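-- pv_equiv track=rewrite | github.com/AaronShark/clamp-core | packs/HotMemoryProjection/src/tools/hot_context.py | trim_items_to_budget
-- ===== SOURCE A (Python) =====
-- import math
--
-- def approx_tokens(text: str) -> int:
--     return max(1, math.ceil(len(text) / 4))
--
-- def trim_items_to_budget(items: list[str], budget: int) -> list[str]:
--     kept: list[str] = []
--     used = 0
--     for item in items:
--         item_cost = approx_tokens(item)
--         if kept and used + item_cost > budget:
--             break
--         if not kept and item_cost > budget:
--             kept.append(item)
--             break
--         kept.append(item)
--         used += item_cost
--     return kept
-- ===== SOURCE B (Python) =====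
-- import math
--
--
-- def approx_tokens(text: str) -> int:
--     return max(1, math.ceil(len(text) / 4))
--
--
-- def trim_items_to_budget(items: list[str], budget: int) -> list[str]:
--     # Prefix-sum table of item costs, then count how many cumulative
--     # totals fit the budget and slice; max(1, k) keeps the first item
--     # even when it alone exceeds the budget (and yields [] for []).
--     totals = []
--     t = 0
--     for x in items:
--         t += approx_tokens(x)
--         totals.append(t)
--     k = sum(1 for t in totals if t <= budget)
--     return items[:max(1, k)]
-- ===== Notes on version B (the rewrite author's own statement) =====
-- stated objective: alternative
-- what changed: Replaces the break-on-overflow accumulation loop over a kept list by a prefix-sum table: count the cumulative totals within budget and return items[:max(1,k)], with no early exit and no kept/used state.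
import Mathlib
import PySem

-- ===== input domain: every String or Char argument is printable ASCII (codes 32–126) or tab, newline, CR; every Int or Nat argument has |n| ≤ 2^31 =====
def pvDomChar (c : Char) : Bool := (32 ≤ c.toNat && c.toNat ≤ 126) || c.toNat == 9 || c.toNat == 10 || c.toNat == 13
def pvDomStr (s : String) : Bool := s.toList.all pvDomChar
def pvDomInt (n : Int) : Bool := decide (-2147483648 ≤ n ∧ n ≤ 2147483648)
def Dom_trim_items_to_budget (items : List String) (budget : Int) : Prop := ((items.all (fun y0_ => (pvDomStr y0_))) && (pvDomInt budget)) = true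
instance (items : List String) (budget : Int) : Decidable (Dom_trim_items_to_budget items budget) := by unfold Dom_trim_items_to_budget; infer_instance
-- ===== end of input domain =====

-- B replaces A's break-on-overflow accumulation loop by a prefix-sum table,
-- a count of the totals within budget, and one slice (objective: alternative).

-- ===== PORT A =====
-- approx_tokens: math.ceil(len(text)/4) ported as the ceiling division -((-len)//4),
-- exact for the nonnegative lengths that occur.
def approxTokens (text : String) : Int :=
  max 1 (-(PySem.Int.floordiv (-(PySem.Str.len text)) 4))

def trimALoop (budget : Int) : List String → List String → Int → List String
  | [], kept, _ => kept
  | item :: rest, kept, used =>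
    let item_cost := approxTokens item
    if kept ≠ [] ∧ budget < used + item_cost then kept
    else if kept = [] ∧ budget < item_cost then kept ++ [item]
    else trimALoop budget rest (kept ++ [item]) (used + item_cost)

def trim_items_to_budget (items : List String) (budget : Int) : List String :=
  trimALoop budget items [] 0

-- ===== PORT B =====
-- the `totals` loop of Source B: running prefix sums of the costs, starting from acc
def accumFrom (acc : Int) : List Int → List Int
  | [] => []
  | c :: cs => (acc + c) :: accumFrom (acc + c) cs

def trim_items_to_budget_alt (items : List String) (budget : Int) : List String :=
  let totals := accumFrom 0 (items.map approxTokens)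
  let k := totals.countP (fun t => decide (t ≤ budget))
  -- items[:max(1,k)] with a nonnegative bound is exactly List.take
  items.take (max 1 k)

-- ===== PRECONDITION & SPEC =====
def Spec_trim_items_to_budget (items : List String) (budget : Int) (out : List String) : Prop := out = trim_items_to_budget_alt items budget
instance (items : List String) (budget : Int) (out : List String) : Decidable (Spec_trim_items_to_budget items budget out) := by unfold Spec_trim_items_to_budget; infer_instance

-- ===== CLAIM (what is proved, stated in full; the proofs are below) =====
def Claim_equal_trim_items_to_budget : Prop := ∀ (items : List String) (budget : Int), Dom_trim_items_to_budget items budget → Spec_trim_items_to_budget items budget (trim_items_to_budget items budget)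

-- ===== LEMMAS AND PROOFS =====

theorem one_le_approxTokens (s : String) : 1 ≤ approxTokens s := le_max_left _ _

theorem accumFrom_gt (cs : List Int) (h : ∀ c ∈ cs, 1 ≤ c) (a : Int) :
    ∀ x ∈ accumFrom a cs, a < x := by
  induction cs generalizing a with
  | nil => simp [accumFrom]
  | cons c cs ih =>
    intro x hx
    simp only [accumFrom, List.mem_cons] at hx
    have hc : 1 ≤ c := h c (by simp)
    rcases hx with rfl | hx
    · omega
    · have := ih (fun d hd => h d (by simp [hd])) (a + c) x hx
      omega

theorem countP_accumFrom_cons_zero (budget a c : Int) (cs : List Int)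
    (h : ∀ d ∈ cs, 1 ≤ d) (hb : budget < a + c) :
    (accumFrom a (c :: cs)).countP (fun t => decide (t ≤ budget)) = 0 := by
  rw [List.countP_eq_zero]
  intro x hx
  simp only [accumFrom, List.mem_cons] at hx
  simp only [decide_eq_true_eq]
  rcases hx with rfl | hx
  · omega
  · have := accumFrom_gt cs h (a + c) x hx
    omega

theorem countP_accumFrom_cons_succ (budget a c : Int) (cs : List Int)
    (hle : a + c ≤ budget) :
    (accumFrom a (c :: cs)).countP (fun t => decide (t ≤ budget)) =
      (accumFrom (a + c) cs).countP (fun t => decide (t ≤ budget)) + 1 := by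
  simp [accumFrom, hle]

theorem trimALoop_eq (budget : Int) (rest : List String) :
    ∀ (kept : List String) (used : Int), kept ≠ [] →
      trimALoop budget rest kept used =
        kept ++ rest.take ((accumFrom used (rest.map approxTokens)).countP
          (fun t => decide (t ≤ budget))) := by
  induction rest with
  | nil => intro kept used _; simp [trimALoop, accumFrom]
  | cons item rest ih =>
    intro kept used hk
    have hcosts : ∀ c ∈ rest.map approxTokens, 1 ≤ c := by
      intro c hc
      rcases List.mem_map.mp hc with ⟨s, _, rfl⟩
      exact one_le_approxTokens s
    by_cases hb : budget < used + approxTokens item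
    · have h0 := countP_accumFrom_cons_zero budget used (approxTokens item)
        (rest.map approxTokens) hcosts hb
      simp only [List.map_cons] at *
      simp [trimALoop, hk, hb, h0]
    · have hle : used + approxTokens item ≤ budget := by omega
      have hcount := countP_accumFrom_cons_succ budget used (approxTokens item)
        (rest.map approxTokens) hle
      simp only [List.map_cons] at *
      simp only [trimALoop, hk, hb, and_false, false_and, if_false, ne_eq,
        not_false_iff]
      rw [ih (kept ++ [item]) (used + approxTokens item) (by simp)]
      rw [hcount]
      simp [List.take_succ_cons, List.append_assoc]

theorem trim_eq (items : List String) (budget : Int) :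
    trim_items_to_budget items budget = trim_items_to_budget_alt items budget := by
  cases items with
  | nil => simp [trim_items_to_budget, trim_items_to_budget_alt, trimALoop, accumFrom]
  | cons item rest =>
    have hcosts : ∀ c ∈ rest.map approxTokens, 1 ≤ c := by
      intro c hc
      rcases List.mem_map.mp hc with ⟨s, _, rfl⟩
      exact one_le_approxTokens s
    unfold trim_items_to_budget trim_items_to_budget_alt
    by_cases hb : budget < approxTokens item
    · have h0 := countP_accumFrom_cons_zero budget 0 (approxTokens item)
        (rest.map approxTokens) hcosts (by omega)
      simp only [List.map_cons] at *
      simp [trimALoop, hb, h0]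
    · have hle : approxTokens item ≤ budget := by omega
      have hcount := countP_accumFrom_cons_succ budget 0 (approxTokens item)
        (rest.map approxTokens) (by omega)
      simp only [List.map_cons] at *
      simp only [trimALoop, ne_eq, not_true_eq_false, false_and, if_false,
        hb, List.nil_append]
      rw [trimALoop_eq budget rest [item] (0 + approxTokens item) (by simp)]
      rw [hcount]
      have hmax : max 1 (((accumFrom (0 + approxTokens item) (rest.map approxTokens)).countP
          (fun t => decide (t ≤ budget))) + 1) =
          ((accumFrom (0 + approxTokens item) (rest.map approxTokens)).countP
            (fun t => decide (t ≤ budget))) + 1 := by omega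
      simp [List.take_succ_cons]

-- ===== VERDICT (by name: the statement is the Claim_ definition above) =====
theorem trim_items_to_budget_spec : Claim_equal_trim_items_to_budget := by
  intro items budget _
  exact trim_eq items budget
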